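-- pv_equiv track=rewrite | github.com/Lysagxra/HentaiSaturnDownloader | helpers/download_utils.py | get_chunk_size
-- ===== SOURCE A (Python) =====
-- KB = 1024
--
-- MB = 1024 * KB
--
-- def get_chunk_size(file_size):
--     """
--     Determines the optimal chunk size based on the file size.
--
--     Args:
--         file_size (int): The size of the file in bytes.
--
--     Returns:
--         int: The optimal chunk size in bytes.
--     """
--     thresholds = [
--         (50 * MB, 64 * KB),    # Less than 50 MB
--         (100 * MB, 128 * KB),  # 50 MB to 100 MB
--         (250 * MB, 256 * KB),  # 100 MB to 250 MB
--         (500 * MB, 512 * KB)   # 250 MB to 500 MB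
--     ]
--
--     for threshold, chunk_size in thresholds:
--         if file_size < threshold:
--             return chunk_size
--
--     return 1 * MB
-- ===== SOURCE B (Python) =====
-- KB = 1024
--
-- MB = 1024 * KB
--
-- def get_chunk_size(file_size):
--     """Binary-search the boundary table instead of scanning (threshold, chunk) pairs."""
--     boundaries = [50 * MB, 100 * MB, 250 * MB, 500 * MB]
--     chunks = [64 * KB, 128 * KB, 256 * KB, 512 * KB, 1 * MB]
--     # hand-rolled bisect_right (strict '<' keeps exact-boundary sizes in the upper bucket)
--     lo, hi = 0, len(boundaries)
--     while lo < hi: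
--         mid = (lo + hi) // 2
--         if file_size < boundaries[mid]:
--             hi = mid
--         else:
--             lo = mid + 1
--     return chunks[lo]
-- ===== Notes on version B (the rewrite author's own statement) =====
-- stated objective: alternative
-- what changed: Replaces the linear early-return scan over (threshold, chunk) pairs with parallel boundary/chunk tables indexed by a hand-written bisect_right binary search.
import Mathlib
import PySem

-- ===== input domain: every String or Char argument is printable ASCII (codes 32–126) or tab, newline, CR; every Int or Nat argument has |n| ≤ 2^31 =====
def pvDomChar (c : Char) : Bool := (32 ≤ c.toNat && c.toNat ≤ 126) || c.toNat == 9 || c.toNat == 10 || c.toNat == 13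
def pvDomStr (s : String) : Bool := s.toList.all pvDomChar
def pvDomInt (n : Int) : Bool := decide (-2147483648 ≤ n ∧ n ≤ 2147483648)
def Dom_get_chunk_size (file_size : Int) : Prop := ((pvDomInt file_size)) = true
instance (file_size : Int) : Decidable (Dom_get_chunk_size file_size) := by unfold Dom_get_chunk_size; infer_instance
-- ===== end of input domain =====

-- B replaces A's linear scan over (threshold, chunk) pairs with a bisect_right binary
-- search over parallel boundary/chunk tables (alternative decomposition, same result).


-- ===== PORT A =====
-- A: scan the (threshold, chunk) pairs, return the first chunk whose threshold exceeds file_size.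
def pvScanA (file_size : Int) : List (Int × Int) → Int
  | [] => 1 * (1024 * 1024)
  | (threshold, chunk_size) :: rest =>
      if file_size < threshold then chunk_size else pvScanA file_size rest

def get_chunk_size (file_size : Int) : Int :=
  pvScanA file_size
    [(50 * (1024 * 1024), 64 * 1024),
     (100 * (1024 * 1024), 128 * 1024),
     (250 * (1024 * 1024), 256 * 1024),
     (500 * (1024 * 1024), 512 * 1024)]

-- ===== PORT B =====
-- B: bisect_right on the boundaries list, then index the chunks list.
def pvBisectRight (bs : List Int) (x : Int) (lo hi : Nat) : Nat :=
  if lo < hi then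
    let mid := (lo + hi) / 2
    if x < bs.getD mid 0 then pvBisectRight bs x lo mid
    else pvBisectRight bs x (mid + 1) hi
  else lo
termination_by hi - lo
decreasing_by all_goals omega

def get_chunk_size_alt (file_size : Int) : Int :=
  let boundaries : List Int := [50 * (1024 * 1024), 100 * (1024 * 1024), 250 * (1024 * 1024), 500 * (1024 * 1024)]
  let chunks : List Int := [64 * 1024, 128 * 1024, 256 * 1024, 512 * 1024, 1 * (1024 * 1024)]
  chunks.getD (pvBisectRight boundaries file_size 0 boundaries.length) 0

-- ===== PRECONDITION & SPEC =====
def Spec_get_chunk_size (file_size : Int) (out : Int) : Prop := out = get_chunk_size_alt file_size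
instance (file_size : Int) (out : Int) : Decidable (Spec_get_chunk_size file_size out) := by unfold Spec_get_chunk_size; infer_instance

-- ===== CLAIM (what is proved, stated in full; the proofs are below) =====
def Claim_equal_get_chunk_size : Prop := ∀ (file_size : Int), Dom_get_chunk_size file_size → Spec_get_chunk_size file_size (get_chunk_size file_size)

-- ===== LEMMAS AND PROOFS =====

-- ===== VERDICT (by name: the statement is the Claim_ definition above) =====
theorem get_chunk_size_spec : Claim_equal_get_chunk_size := by
  intro x _
  unfold Spec_get_chunk_size get_chunk_size get_chunk_size_alt
  simp only [pvScanA]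
  unfold pvBisectRight
  norm_num
  unfold pvBisectRight
  norm_num
  unfold pvBisectRight
  norm_num
  unfold pvBisectRight
  norm_num
  split_ifs <;> simp <;> omega
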